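-- pv_equiv track=rewrite | github.com/shreyas-algo/algoexpert | Strings/group_anagrams.py | getKeyForWord
-- ===== SOURCE A (Python) =====
-- def getKeyForWord(word):
-- 	key_dict = {}
-- 	# create character count dictionary
-- 	# O(k)
-- 	for char in word:
-- 		char_count = key_dict.get(char, 0)
-- 		key_dict[char] = char_count + 1
-- 	# create the key
-- 	key = []
-- 	# O(k log k) -> O(number of alphabets in the language) -> O(26 log 26) (if only english) -> O(1) or O(m log m) where m is the number of alphabets allowed in the language. Thus the time taken will not grow based on length of list or length of word
--     # Important: can be futher optimized to O(k) by creating an init dictionary for ascii which itself is sorted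
--     # But wait think about it k in this case will be maximum 26 (for alphabets)
--     # So it boils down to constant time -> because k = 26 (constant). The word will atmost have all letters of the english alphabet. Hence, this optimization is not really required here. But can be a great discussion in an interview
-- 	for k in sorted(key_dict.keys()):
-- 		key.append(k + str(key_dict[k]))
-- 	return "".join(key)
-- ===== SOURCE B (Python) =====
-- def getKeyForWord(word):
--     s = sorted(word)
--     if not s:
--         return ""
--     pieces = []
--     cur = s[0]
--     cnt = 1
--     for ch in s[1:]:
--         if ch == cur:
--             cnt += 1
--         else:
--             pieces.append(cur + str(cnt))
--             cur = ch
--             cnt = 1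
--     pieces.append(cur + str(cnt))
--     return "".join(pieces)
-- ===== Notes on version B (the rewrite author's own statement) =====
-- stated objective: alternative
-- what changed: Replaces the character-count dictionary plus sorted-keys pass by sorting the word itself and run-length encoding consecutive equal characters in one linear scan.
import Mathlib
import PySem

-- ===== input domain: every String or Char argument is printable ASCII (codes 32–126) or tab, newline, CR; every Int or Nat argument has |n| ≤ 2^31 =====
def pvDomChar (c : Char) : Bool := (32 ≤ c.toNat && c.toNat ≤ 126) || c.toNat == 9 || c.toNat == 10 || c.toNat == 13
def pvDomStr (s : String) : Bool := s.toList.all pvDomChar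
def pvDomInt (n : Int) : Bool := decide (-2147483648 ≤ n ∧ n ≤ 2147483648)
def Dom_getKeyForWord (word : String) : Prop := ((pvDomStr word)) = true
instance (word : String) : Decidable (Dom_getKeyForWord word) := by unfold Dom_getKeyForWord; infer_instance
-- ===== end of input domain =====

-- B replaces A's char-count dictionary + sorted-keys pass by sorting the word and
-- run-length encoding consecutive equal characters in one scan (alternative algorithm).

-- ===== PORT A =====
-- Strings are handled at the List Char level (PySem.Chars): k + str(n) is k :: toChars n,
-- and "".join(key) is key.flatten (exact, PySem.Chars.join_nil). key_dict[k] is ported as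
-- getD k 0, exact here because k is drawn from key_dict's keys.
def getKeyForWord (word : String) : String :=
  let key_dict := word.toList.foldl (fun d ch => d.insert ch (d.getD ch 0 + 1)) PySem.Dict.empty
  let key := (PySem.List.sorted key_dict.keys (fun x => x) false).foldl
      (fun key k => key ++ [k :: PySem.Int.toChars (key_dict.getD k 0)]) ([] : List (List Char))
  String.ofList key.flatten

-- ===== PORT B =====
-- the loop over s[1:] with state (cur, cnt, pieces); the final flush is the [] case
def altGo (s : List Char) (cur : Char) (cnt : Int) (pieces : List (List Char)) : List (List Char) :=
  match s with
  | [] => pieces ++ [cur :: PySem.Int.toChars cnt]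
  | ch :: rest =>
    if ch = cur then altGo rest cur (cnt + 1) pieces
    else altGo rest ch 1 (pieces ++ [cur :: PySem.Int.toChars cnt])

def getKeyForWord_alt (word : String) : String :=
  match PySem.List.sorted word.toList (fun x => x) false with
  | [] => ""
  | c :: rest => String.ofList (altGo rest c 1 []).flatten

-- ===== PRECONDITION & SPEC =====
def Spec_getKeyForWord (word : String) (out : String) : Prop := out = getKeyForWord_alt word
instance (word : String) (out : String) : Decidable (Spec_getKeyForWord word out) := by unfold Spec_getKeyForWord; infer_instance

-- ===== CLAIM (what is proved, stated in full; the proofs are below) =====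
def Claim_equal_getKeyForWord : Prop := ∀ (word : String), Dom_getKeyForWord word → Spec_getKeyForWord word (getKeyForWord word)

-- ===== LEMMAS AND PROOFS =====

-- proof-only: the first characters of the maximal runs of a list
def runHeads : List Char → List Char
  | [] => []
  | x :: xs => x :: runHeads (xs.dropWhile (· == x))
termination_by l => l.length
decreasing_by
  have := List.length_dropWhile_le (· == x) xs
  simp; omega

theorem mem_dropWhile_of_ne {x y : Char} {ys : List Char} (hm : y ∈ ys) (hne : y ≠ x) :
    y ∈ ys.dropWhile (· == x) := by
  induction ys with
  | nil => cases hm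
  | cons z zs ih =>
    by_cases hz : z = x
    · subst hz
      simp only [List.dropWhile_cons, BEq.rfl]
      rcases List.mem_cons.mp hm with h | h
      · exact absurd h hne
      · simpa using ih h
    · rw [List.dropWhile_cons_of_neg (by simpa using hz)]
      exact hm

theorem subset_runHeads : ∀ (s : List Char), ∀ y ∈ runHeads s, y ∈ s
  | [], y, hy => by simp [runHeads] at hy
  | x :: xs, y, hy => by
    rw [runHeads] at hy
    rcases List.mem_cons.mp hy with h | h
    · simp [h]
    · have := subset_runHeads (xs.dropWhile (· == x)) y h
      exact List.mem_cons_of_mem _ ((List.dropWhile_sublist _).subset this)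
termination_by s => s.length
decreasing_by
  have := List.length_dropWhile_le (· == x) xs
  simp; omega

theorem mem_runHeads : ∀ (s : List Char), ∀ y ∈ s, y ∈ runHeads s
  | [], y, hy => by cases hy
  | x :: xs, y, hy => by
    rw [runHeads]
    by_cases hx : y = x
    · simp [hx]
    · rcases List.mem_cons.mp hy with h | h
      · exact absurd h hx
      · exact List.mem_cons_of_mem _
          (mem_runHeads _ y (mem_dropWhile_of_ne h hx))
termination_by s => s.length
decreasing_by
  have := List.length_dropWhile_le (· == x) xs
  simp; omega

theorem runHeads_pairwise_lt : ∀ (s : List Char), s.Pairwise (· ≤ ·) →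
    (runHeads s).Pairwise (· < ·)
  | [], _ => by simp [runHeads]
  | x :: xs, hp => by
    rw [runHeads]
    rcases List.pairwise_cons.mp hp with ⟨hle, hxs⟩
    have hsub : (xs.dropWhile (· == x)).Sublist xs := List.dropWhile_sublist _
    have hpd : (xs.dropWhile (· == x)).Pairwise (· ≤ ·) := hxs.sublist hsub
    refine List.pairwise_cons.mpr ⟨?_, runHeads_pairwise_lt _ hpd⟩
    intro y hy
    have hy' := subset_runHeads _ y hy
    cases hd : xs.dropWhile (· == x) with
    | nil => rw [hd] at hy'; cases hy'
    | cons z zs =>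
      have hzx : ((xs.dropWhile (· == x)).head (by simp [hd]) == x) = false :=
        List.head_dropWhile_not (· == x) (by simp [hd])
      have hzx' : z ≠ x := by
        simp only [hd, List.head_cons] at hzx
        simpa using hzx
      have hxz : x < z := by
        have : x ≤ z := hle z ((List.dropWhile_sublist _).subset (by rw [hd]; simp))
        exact lt_of_le_of_ne this (Ne.symm hzx')
      rw [hd] at hy'
      rcases List.mem_cons.mp hy' with h | h
      · exact h ▸ hxz
      · have : z ≤ y := ((List.pairwise_cons.mp (hd ▸ hpd)).1) y h
        exact lt_of_lt_of_le hxz this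
termination_by s => s.length
decreasing_by
  have := List.length_dropWhile_le (· == x) xs
  simp; omega

-- A's output-building loop is a map
theorem foldl_append_map {α β : Type} (f : α → β) :
    ∀ (xs : List α) (init : List β),
      xs.foldl (fun acc k => acc ++ [f k]) init = init ++ xs.map f := by
  intro xs
  induction xs with
  | nil => simp
  | cons x t ih => intro init; simp [List.foldl_cons, ih, List.map_cons]

-- the run-length loop, characterized over runHeads
theorem altGo_eq : ∀ (rest : List Char) (cur : Char) (cnt : Int) (pieces : List (List Char)),
    (cur :: rest).Pairwise (· ≤ ·) →
    altGo rest cur cnt pieces =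
      pieces ++ (runHeads (cur :: rest)).map
        (fun c => c :: PySem.Int.toChars
          (if c = cur then cnt + (rest.count cur : Int) else (rest.count c : Int)))
  | [], cur, cnt, pieces, _ => by
    simp [altGo, runHeads]
  | c :: t, cur, cnt, pieces, hp => by
    rcases List.pairwise_cons.mp hp with ⟨hle, htp⟩
    by_cases hc : c = cur
    · subst hc
      have hp' : (c :: t).Pairwise (· ≤ ·) := htp
      rw [altGo, if_pos rfl, altGo_eq t c (cnt + 1) pieces hp']
      have hrh : runHeads (c :: c :: t) = runHeads (c :: t) := by
        rw [runHeads, runHeads]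
        simp [BEq.rfl]
      rw [← hrh]
      congr 1
      apply List.map_congr_left
      intro x _
      by_cases hx : x = c
      · subst hx
        rw [if_pos rfl, if_pos rfl, List.count_cons_self]
        congr 2
        push_cast
        omega
      · rw [if_neg hx, if_neg hx, List.count_cons, if_neg (fun h => hx ((beq_iff_eq.mp h).symm)), add_zero]
    · have hcur_lt : ∀ y ∈ c :: t, cur < y := by
        intro y hy
        have h1 : cur ≤ c := hle c (by simp)
        have hcc : cur < c := lt_of_le_of_ne h1 (Ne.symm hc)
        rcases List.mem_cons.mp hy with h | h
        · exact h ▸ hcc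
        · exact lt_of_lt_of_le hcc ((List.pairwise_cons.mp htp).1 y h)
      rw [altGo, if_neg hc, altGo_eq t c 1 _ htp]
      have hdw : (c :: t).dropWhile (· == cur) = c :: t := by
        rw [List.dropWhile_cons_of_neg]
        simpa using hc
      have hrh : runHeads (cur :: c :: t) = cur :: runHeads (c :: t) := by
        rw [runHeads, hdw]
      rw [hrh, List.map_cons, List.append_assoc, List.singleton_append]
      congr 1
      have hnm : cur ∉ c :: t := fun h => absurd (hcur_lt cur h) (lt_irrefl cur)
      congr 1
      · rw [if_pos rfl, List.count_eq_zero_of_not_mem hnm]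
        norm_num
      · apply List.map_congr_left
        intro x hx
        have hxm : x ∈ c :: t := subset_runHeads _ x hx
        have hxne : x ≠ cur := fun h => absurd (h ▸ hcur_lt x hxm) (lt_irrefl cur)
        by_cases hxc : x = c
        · subst hxc
          rw [if_neg hxne, if_pos rfl, List.count_cons_self]
          congr 2
          push_cast
          omega
        · rw [if_neg hxne, if_neg hxc, List.count_cons, if_neg (fun h => hxc ((beq_iff_eq.mp h).symm)), add_zero]

-- the sorted distinct keys of A are exactly the run heads of the sorted word
theorem sorted_ofList_eq_runHeads (l : List Char) :
    PySem.List.sorted (PySem.Set.ofList l) (fun x => x) false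
      = runHeads (PySem.List.sorted l (fun x => x) false) := by
  set s := PySem.List.sorted l (fun x => x) false with hs
  have hps : s.Pairwise (· ≤ ·) := PySem.List.sorted_pairwise l _
  have hperm_sl : s.Perm l := PySem.List.sorted_perm l _ _
  have hlt : (runHeads s).Pairwise (· < ·) := runHeads_pairwise_lt s hps
  have hnd : (runHeads s).Nodup := hlt.imp ne_of_lt
  have hmem : ∀ x, x ∈ runHeads s ↔ x ∈ PySem.Set.ofList l := by
    intro x
    rw [← PySem.List.dedup_eq_ofList, PySem.List.mem_dedup]
    constructor
    · intro h; exact hperm_sl.mem_iff.mp (subset_runHeads s x h)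
    · intro h; exact mem_runHeads s x (hperm_sl.mem_iff.mpr h)
  have hndo : (PySem.Set.ofList l : List Char).Nodup := by
    rw [← PySem.List.dedup_eq_ofList]; exact PySem.List.nodup_dedup l
  have hperm : (runHeads s).Perm (PySem.Set.ofList l) :=
    (List.perm_ext_iff_of_nodup hnd hndo).mpr hmem
  exact PySem.List.sorted_eq_of_perm_of_pairwise_lt _ _ _ hperm hlt

-- ===== VERDICT (by name: the statement is the Claim_ definition above) =====
theorem getKeyForWord_spec : Claim_equal_getKeyForWord := by
  intro word _
  unfold Spec_getKeyForWord getKeyForWord getKeyForWord_alt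
  simp only
  rw [PySem.Dict.foldl_insert_getD_add_one_eq_counter, PySem.Dict.keys_counter,
      foldl_append_map, List.nil_append, sorted_ofList_eq_runHeads]
  set s := PySem.List.sorted word.toList (fun x => x) false with hs
  have hperm : s.Perm word.toList := PySem.List.sorted_perm _ _ _
  cases hse : s with
  | nil =>
    simp only [runHeads, List.map_nil, List.flatten_nil]
  | cons c rest =>
    change _ = String.ofList (altGo rest c 1 []).flatten
    have hps : (c :: rest).Pairwise (· ≤ ·) := hse ▸ PySem.List.sorted_pairwise word.toList _
    rw [altGo_eq rest c 1 [] hps, List.nil_append]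
    congr 2
    apply List.map_congr_left
    intro x hx
    congr 1
    rw [PySem.Dict.getD_counter]
    have hcount : word.toList.count x = s.count x := (hperm.count_eq x).symm
    rw [hcount, hse]
    by_cases hxc : x = c
    · subst hxc
      rw [if_pos rfl, List.count_cons_self]
      congr 1
      push_cast
      omega
    · rw [if_neg hxc, List.count_cons, if_neg (fun h => hxc ((beq_iff_eq.mp h).symm)), add_zero]
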